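-- pv_equiv track=rewrite | github.com/NicoHambauer/Model-Performance-vs-Interpretability | majority_hpo.py | remove_newlines_inside_square_brackets
-- ===== SOURCE A (Python) =====
-- def remove_newlines_inside_square_brackets(input_string):
--     inside_brackets = False
--     start_index = None
--     part_to_be_replaced = []
--     replacing_part = []
--     for i, char in enumerate(input_string):
--         if char == '[' and not inside_brackets:
--             inside_brackets = True
--             start_index = i
--         elif char == ']' and inside_brackets:
--             inside_brackets = False
--             part_to_be_replaced.append(input_string[start_index:i+1])
--             replacing_part.append(input_string[start_index:i+1].replace('\n', ' '))
--     result = input_string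
--     for index, old_part in enumerate(part_to_be_replaced):
--         result = result.replace(old_part, replacing_part[index])
--     return result
-- ===== SOURCE B (Python) =====
-- def remove_newlines_inside_square_brackets(input_string):
--     # A bracketed segment runs from the first '[' of a ']'-chunk to that ']'.
--     chunks = input_string.split(']')
--     segments = [c[c.find('['):] + ']' for c in chunks[:-1] if '[' in c]
--     result = input_string
--     for segment in segments:
--         result = result.replace(segment, segment.replace('\n', ' '))
--     return result
-- ===== Notes on version B (the rewrite author's own statement) =====
-- stated objective: simpler
-- what changed: A walks the string character by character with an inside-brackets flag, a start index and two parallel lists to collect each bracketed segment and its stripped form, then replaces by position-paired lookup; B gets the same segment list in one line by splitting on the closing bracket and slicing each chunk from its first opening bracket, and replaces each segment with its newline-stripped form computed inline.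
import Mathlib
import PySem

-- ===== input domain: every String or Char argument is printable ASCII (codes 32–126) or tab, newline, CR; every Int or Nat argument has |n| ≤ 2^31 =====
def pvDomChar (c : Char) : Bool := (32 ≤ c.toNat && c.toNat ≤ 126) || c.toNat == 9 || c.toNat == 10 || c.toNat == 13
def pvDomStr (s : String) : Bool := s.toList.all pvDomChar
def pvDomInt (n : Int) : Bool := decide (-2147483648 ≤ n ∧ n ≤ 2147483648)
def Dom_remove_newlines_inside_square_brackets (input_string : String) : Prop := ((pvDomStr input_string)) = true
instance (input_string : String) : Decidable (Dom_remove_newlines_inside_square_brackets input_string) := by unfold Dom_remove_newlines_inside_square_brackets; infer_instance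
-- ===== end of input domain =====

-- B replaces A's character-by-character scanner (inside-brackets flag, start index, two
-- parallel segment lists) by a one-line split/slice collection of the same bracketed
-- segments, followed by the same global replaces (objective: simpler).

-- ===== PORT A =====
-- scan state: (inside_brackets, start_index, part_to_be_replaced, replacing_part);
-- start_index is Option Int: Python's None, read (getD) only after it was set.
def pvScanStep (s : String) (st : Bool × Option Int × List String × List String)
    (ic : Int × Char) : Bool × Option Int × List String × List String :=
  if ic.2 = '[' ∧ st.1 = false then
    (true, some ic.1, st.2.2.1, st.2.2.2)
  else if ic.2 = ']' ∧ st.1 = true then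
    (false, st.2.1,
     st.2.2.1 ++ [PySem.Str.slice s (some (st.2.1.getD 0)) (some (ic.1 + 1))],
     st.2.2.2 ++ [PySem.Str.replace (PySem.Str.slice s (some (st.2.1.getD 0)) (some (ic.1 + 1))) "\n" " "])
  else st

def remove_newlines_inside_square_brackets (input_string : String) : String :=
  let fin := (PySem.List.enumerate input_string.toList 0).foldl (pvScanStep input_string)
    (false, none, [], [])
  -- for index, old_part in enumerate(part_to_be_replaced): result = result.replace(old_part, replacing_part[index])
  (PySem.List.enumerate fin.2.2.1 0).foldl
    (fun result p => PySem.Str.replace result p.2 (PySem.List.pyGetD fin.2.2.2 p.1 ""))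
    input_string

-- ===== PORT B =====
def remove_newlines_inside_square_brackets_alt (input_string : String) : String :=
  -- chunks = input_string.split(']'): the separator "]" is never empty, so split? is some
  let chunks := (PySem.Str.split? input_string "]").getD []
  -- segments = [c[c.find('['):] + ']' for c in chunks[:-1] if '[' in c]  (string + via ofList/toList, exact)
  let segments := chunks.dropLast.filterMap fun c =>
    if PySem.Str.isIn "[" c then
      some (String.ofList ((PySem.Str.slice c (some (PySem.Str.find c "[")) none).toList ++ [']']))
    else none
  segments.foldl
    (fun result segment =>
      PySem.Str.replace result segment (PySem.Str.replace segment "\n" " "))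
    input_string

-- ===== PRECONDITION & SPEC =====
def Spec_remove_newlines_inside_square_brackets (input_string : String) (out : String) : Prop :=
  out = remove_newlines_inside_square_brackets_alt input_string
instance (input_string : String) (out : String) :
    Decidable (Spec_remove_newlines_inside_square_brackets input_string out) := by
  unfold Spec_remove_newlines_inside_square_brackets; infer_instance

-- ===== CLAIM (what is proved, stated in full; the proofs are below) =====
def Claim_equal_remove_newlines_inside_square_brackets : Prop :=
  ∀ (input_string : String), Dom_remove_newlines_inside_square_brackets input_string →
    Spec_remove_newlines_inside_square_brackets input_string
      (remove_newlines_inside_square_brackets input_string)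

-- ===== LEMMAS AND PROOFS =====

-- the bracketed segments, as lists of characters: for each ']'-chunk before the last,
-- the text from its first '[' (both programs are shown to act on exactly this list)
def pvRegs (d : List (List Char)) : List (List Char) :=
  d.filterMap fun c => if '[' ∈ c then some (c.dropWhile (· ≠ '[')) else none

def pvPats (cs : List (List Char)) : List (List Char) := pvRegs cs.dropLast

-- newline-to-space map ("inner replace" of both programs)
def pvStrip (l : List Char) : List Char := l.map fun c => if c = '\n' then ' ' else c

theorem pvStrip_append (a b : List Char) : pvStrip (a ++ b) = pvStrip a ++ pvStrip b :=
  List.map_append ..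

-- str.replace, recast as a structural recursion (bridged to PySem.Chars.replace below)
def pvRepl (old new : List Char) : List Char → List Char
  | [] => []
  | c :: t =>
    if h : old ≠ [] ∧ old.isPrefixOf (c :: t) then
      new ++ pvRepl old new ((c :: t).drop old.length)
    else
      c :: pvRepl old new t
termination_by l => l.length
decreasing_by
  · have : old.length ≠ 0 := by
      intro h0
      exact h.1 (List.eq_nil_of_length_eq_zero h0)
    simp [List.length_drop]
    omega
  · simp

theorem pvRepl_go (old new : List Char) (hold : old ≠ []) :
    ∀ (fuel : Nat) (l acc : List Char), l.length ≤ fuel →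
      PySem.Chars.replace.go old new fuel l acc = acc.reverse ++ pvRepl old new l := by
  intro fuel
  induction fuel with
  | zero =>
    intro l acc h
    have : l = [] := List.eq_nil_of_length_eq_zero (Nat.le_zero.mp h)
    subst this
    simp [PySem.Chars.replace.go, pvRepl]
  | succ fuel ih =>
    intro l acc h
    match l with
    | [] => simp [PySem.Chars.replace.go, pvRepl]
    | c :: t =>
      rw [PySem.Chars.replace.go]
      by_cases hp : old.isPrefixOf (c :: t)
      · rw [if_pos hp]
        have hlen : ((c :: t).drop old.length).length ≤ fuel := by
          have : 1 ≤ old.length := by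
            cases old with
            | nil => exact absurd rfl hold
            | cons a b => simp
          simp only [List.length_drop, List.length_cons] at *
          omega
        rw [ih _ _ hlen, pvRepl, dif_pos ⟨hold, hp⟩]
        simp
      · rw [if_neg hp]
        have hlen : t.length ≤ fuel := by simp at h; omega
        rw [ih _ _ hlen, pvRepl, dif_neg (by tauto)]
        simp

theorem pvReplace_eq (old new l : List Char) (hold : old ≠ []) :
    PySem.Chars.replace l old new = pvRepl old new l := by
  rw [PySem.Chars.replace, if_neg (by simpa [List.isEmpty_iff] using hold)]
  simpa using pvRepl_go old new hold l.length l [] le_rfl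

theorem pvRepl_nl (l : List Char) : pvRepl ['\n'] [' '] l = pvStrip l := by
  induction l with
  | nil => simp [pvRepl]; rfl
  | cons c t ih =>
    by_cases hc : c = '\n'
    · subst hc
      rw [pvRepl, dif_pos ⟨by simp, by simp [List.isPrefixOf]⟩]
      show ' ' :: pvRepl ['\n'] [' '] t = pvStrip ('\n' :: t)
      rw [ih]
      show ' ' :: pvStrip t = (if '\n' = '\n' then ' ' else '\n') :: pvStrip t
      rw [if_pos rfl]
    · have hnp : ¬(['\n'] ≠ [] ∧ List.isPrefixOf ['\n'] (c :: t)) := by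
        simp [List.isPrefixOf]
        intro h'
        exact absurd h'.symm hc
      rw [pvRepl, dif_neg hnp]
      rw [ih]
      show c :: pvStrip t = (if c = '\n' then ' ' else c) :: pvStrip t
      rw [if_neg hc]

theorem pvIntercalate_cons (a b : List Char) (t : List (List Char)) :
    [']'].intercalate (a :: b :: t) = a ++ ']' :: [']'].intercalate (b :: t) := by
  simp [List.intercalate, List.intersperse]

theorem pvIntercalate_single (a : List Char) : [']'].intercalate [a] = a := by
  simp [List.intercalate]

theorem pvDropWhile_headC (ch : Char) {c : List Char} (h : ch ∈ c) :
    (c.dropWhile (· ≠ ch)).head? = some ch := by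
  induction c with
  | nil => simp at h
  | cons a t ih =>
    by_cases ha : a = ch
    · subst ha; simp [List.dropWhile]
    · rw [List.dropWhile_cons_of_pos (by simpa using ha)]
      rcases List.mem_cons.mp h with h1 | h1
      · exact absurd h1.symm ha
      · exact ih h1

theorem pvDecompC (ch : Char) {c : List Char} (h : ch ∈ c) :
    ∃ dw', c = c.takeWhile (· ≠ ch) ++ ch :: dw' ∧ c.dropWhile (· ≠ ch) = ch :: dw' := by
  have hh := pvDropWhile_headC ch h
  cases hdw : c.dropWhile (· ≠ ch) with
  | nil => rw [hdw] at hh; simp at hh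
  | cons a dw' =>
    rw [hdw] at hh
    simp only [List.head?_cons, Option.some.injEq] at hh
    refine ⟨dw', ?_, by rw [hh]⟩
    conv_lhs => rw [← List.takeWhile_append_dropWhile (p := fun x => decide (x ≠ ch)) (l := c)]
    rw [hdw, hh]

-- ===== A's scan (phase 1), characterized chunk by chunk =====
theorem pvS1 (s : String) : ∀ (l : List Char), (∀ ch ∈ l, ch ≠ '[') →
    ∀ (k : Int) (st0 : Option Int) (P R : List String),
    (PySem.List.enumerate l k).foldl (pvScanStep s) (false, st0, P, R) = (false, st0, P, R) := by
  intro l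
  induction l with
  | nil => intros; simp [PySem.List.enumerate]
  | cons ch t ih =>
    intro hl k st0 P R
    rw [PySem.List.enumerate_cons, List.foldl_cons]
    have hstep : pvScanStep s (false, st0, P, R) (k, ch) = (false, st0, P, R) := by
      unfold pvScanStep
      rw [if_neg (by simp [hl ch List.mem_cons_self]), if_neg (by simp)]
    rw [hstep]
    exact ih (fun x hx => hl x (List.mem_cons_of_mem _ hx)) _ _ _ _

theorem pvS2 (s : String) : ∀ (l : List Char), ']' ∉ l →
    ∀ (k : Int) (st0 : Option Int) (P R : List String),
    (PySem.List.enumerate l k).foldl (pvScanStep s) (true, st0, P, R) = (true, st0, P, R) := by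
  intro l
  induction l with
  | nil => intros; simp [PySem.List.enumerate]
  | cons ch t ih =>
    intro hl k st0 P R
    simp only [List.mem_cons, not_or] at hl
    rw [PySem.List.enumerate_cons, List.foldl_cons]
    have hstep : pvScanStep s (true, st0, P, R) (k, ch) = (true, st0, P, R) := by
      unfold pvScanStep
      rw [if_neg (by simp), if_neg (by simp; intro h; exact absurd h.symm hl.1)]
    rw [hstep]
    exact ih hl.2 _ _ _ _

theorem pvScan_chunk (s : String) {c : List Char} (hlb : '[' ∈ c) (hrb : ']' ∉ c)
    (k : Nat) (st0 : Option Int) (P R : List String) {pre rest : List Char}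
    (hF : s.toList = pre ++ (c ++ ']' :: rest)) (hk : pre.length = k) :
    (PySem.List.enumerate (c ++ [']']) (k : Int)).foldl (pvScanStep s) (false, st0, P, R)
      = (false, some (((k + (c.takeWhile (· ≠ '[')).length : Nat) : Int)),
         P ++ [String.ofList (c.dropWhile (· ≠ '[') ++ [']'])],
         R ++ [String.ofList (pvStrip (c.dropWhile (· ≠ '[')) ++ [']'])]) := by
  obtain ⟨dw', hdec, hdw⟩ := pvDecompC '[' hlb
  have hrb' : ']' ∉ dw' := by
    intro hm
    exact hrb (by rw [hdec]; exact List.mem_append_right _ (List.mem_cons_of_mem _ hm))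
  have hlen : c.length = (c.takeWhile (· ≠ '[')).length + 1 + dw'.length := by
    conv_lhs => rw [hdec]
    simp
    omega
  conv_lhs => rw [hdec]
  rw [List.append_assoc, PySem.List.enumerate_append, List.foldl_append]
  rw [pvS1 s _ (fun x hx => by
    have := List.mem_takeWhile_imp hx
    simpa using this)]
  rw [show ('[' :: dw') ++ [']'] = '[' :: (dw' ++ [']']) from rfl]
  rw [PySem.List.enumerate_cons, List.foldl_cons]
  have hopen : pvScanStep s (false, st0, P, R) ((k : Int) + (c.takeWhile (· ≠ '[')).length, '[')
      = (true, some ((k : Int) + (c.takeWhile (· ≠ '[')).length), P, R) := by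
    unfold pvScanStep
    rw [if_pos (by simp)]
  rw [hopen, PySem.List.enumerate_append, List.foldl_append, pvS2 s dw' hrb']
  rw [PySem.List.enumerate_cons, List.foldl_cons, PySem.List.enumerate_nil, List.foldl_nil]
  have hidx : (k : Int) + (c.takeWhile (· ≠ '[')).length + 1 + dw'.length
      = ((k + c.length : Nat) : Int) := by
    push_cast [hlen]
    ring
  have hclose : pvScanStep s (true, some ((k : Int) + (c.takeWhile (· ≠ '[')).length), P, R)
      (((k : Int) + (c.takeWhile (· ≠ '[')).length + 1) + (dw'.length : Int), ']')
      = (false, some ((k : Int) + (c.takeWhile (· ≠ '[')).length),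
         P ++ [PySem.Str.slice s (some ((k : Int) + (c.takeWhile (· ≠ '[')).length))
            (some ((((k : Int) + (c.takeWhile (· ≠ '[')).length + 1) + (dw'.length : Int)) + 1))],
         R ++ [PySem.Str.replace (PySem.Str.slice s (some ((k : Int) + (c.takeWhile (· ≠ '[')).length))
            (some ((((k : Int) + (c.takeWhile (· ≠ '[')).length + 1) + (dw'.length : Int)) + 1))) "\n" " "]) := by
    unfold pvScanStep
    rw [if_neg (by simp), if_pos (by simp)]
    rfl
  rw [hclose]
  have hslice : PySem.Str.slice s (some ((k : Int) + (c.takeWhile (· ≠ '[')).length))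
      (some ((((k : Int) + (c.takeWhile (· ≠ '[')).length + 1) + (dw'.length : Int)) + 1))
      = String.ofList ('[' :: dw' ++ [']']) := by
    apply String.toList_inj.mp
    have harg1 : (k : Int) + (c.takeWhile (· ≠ '[')).length
        = ((k + (c.takeWhile (· ≠ '[')).length : Nat) : Int) := by push_cast; ring
    have harg2 : (((k : Int) + (c.takeWhile (· ≠ '[')).length + 1) + (dw'.length : Int)) + 1
        = ((k + (c.takeWhile (· ≠ '[')).length + 1 + dw'.length + 1 : Nat) : Int) := by push_cast; ring
    rw [harg2, harg1]
    rw [PySem.Str.toList_slice, String.toList_ofList, PySem.Chars.slice_eq_listSlice,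
      PySem.List.slice_natCast]
    have hdropF : s.toList.drop (k + (c.takeWhile (· ≠ '[')).length)
        = '[' :: dw' ++ ']' :: rest := by
      have hsplit : s.toList = (pre ++ c.takeWhile (· ≠ '[')) ++ ('[' :: dw' ++ ']' :: rest) := by
        rw [hF]
        conv_lhs => rw [hdec]
        simp
      rw [hsplit, show k + (c.takeWhile (· ≠ '[')).length
          = (pre ++ c.takeWhile (· ≠ '[')).length from by simp [hk]]
      exact List.drop_left
    rw [hdropF]
    rw [show k + (c.takeWhile (· ≠ '[')).length + 1 + dw'.length + 1
        - (k + (c.takeWhile (· ≠ '[')).length) = ('[' :: dw' ++ [']'] : List Char).length from by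
      simp; omega]
    rw [show ('[' :: dw' ++ ']' :: rest : List Char) = ('[' :: dw' ++ [']']) ++ rest from by simp]
    exact List.take_left
  have hrep : PySem.Str.replace (String.ofList ('[' :: dw' ++ [']'])) "\n" " "
      = String.ofList (pvStrip ('[' :: dw') ++ [']']) := by
    apply String.toList_inj.mp
    rw [PySem.Str.toList_replace, String.toList_ofList, String.toList_ofList]
    rw [show (" " : String).toList = [' '] from rfl]
    rw [pvReplace_eq _ _ _ (by simp), pvRepl_nl, pvStrip_append, String.toList_ofList]
    rfl
  rw [hslice, hrep, hdw]
  have : (k : Int) + ((c.takeWhile (· ≠ '[')).length : Int)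
      = (((k + (c.takeWhile (· ≠ '[')).length : Nat)) : Int) := by push_cast; ring
  rw [this]

theorem pvScan_last (s : String) {c : List Char} (hrb : ']' ∉ c) (k : Int)
    (st0 : Option Int) (P R : List String) :
    ∃ b st, (PySem.List.enumerate c k).foldl (pvScanStep s) (false, st0, P, R) = (b, st, P, R) := by
  by_cases hlb : '[' ∈ c
  · obtain ⟨dw', hdec, hdw⟩ := pvDecompC '[' hlb
    have hrb' : ']' ∉ dw' := by
      intro hm
      exact hrb (by rw [hdec]; exact List.mem_append_right _ (List.mem_cons_of_mem _ hm))
    have hrw : (PySem.List.enumerate c k).foldl (pvScanStep s) (false, st0, P, R)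
        = (PySem.List.enumerate (c.takeWhile (· ≠ '[') ++ '[' :: dw') k).foldl (pvScanStep s)
            (false, st0, P, R) := by
      conv_lhs => rw [hdec]
    rw [hrw]
    rw [PySem.List.enumerate_append, List.foldl_append]
    rw [pvS1 s _ (fun x hx => by
      have := List.mem_takeWhile_imp hx
      simpa using this)]
    rw [PySem.List.enumerate_cons, List.foldl_cons]
    have hopen : pvScanStep s (false, st0, P, R) (k + (c.takeWhile (· ≠ '[')).length, '[')
        = (true, some (k + (c.takeWhile (· ≠ '[')).length), P, R) := by
      unfold pvScanStep
      rw [if_pos (by simp)]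
    rw [hopen, pvS2 s dw' hrb']
    exact ⟨_, _, rfl⟩
  · rw [pvS1 s c (fun x hx h => hlb (h ▸ hx))]
    exact ⟨_, _, rfl⟩

theorem pvPats_cons (c c2 : List Char) (t : List (List Char)) :
    pvPats (c :: c2 :: t)
      = (if '[' ∈ c then [c.dropWhile (· ≠ '[')] else []) ++ pvPats (c2 :: t) := by
  unfold pvPats pvRegs
  rw [show (c :: c2 :: t).dropLast = c :: (c2 :: t).dropLast from rfl, List.filterMap_cons]
  by_cases h : '[' ∈ c
  · simp [h]
  · simp [h]

theorem pvScan_main (s : String) : ∀ (cs : List (List Char)), cs ≠ [] → (∀ c ∈ cs, ']' ∉ c) →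
    ∀ (k : Nat) (st0 : Option Int) (P R : List String) (pre : List Char),
    s.toList = pre ++ [']'].intercalate cs → pre.length = k →
    ∃ b st, (PySem.List.enumerate ([']'].intercalate cs) (k : Int)).foldl (pvScanStep s)
        (false, st0, P, R)
      = (b, st, P ++ (pvPats cs).map (fun u => String.ofList (u ++ [']'])),
               R ++ (pvPats cs).map (fun u => String.ofList (pvStrip u ++ [']']))) := by
  intro cs
  induction cs with
  | nil => intro h; exact absurd rfl h
  | cons c cs' ih =>
    intro _ hrb k st0 P R pre hF hk
    cases cs' with
    | nil =>
      rw [pvIntercalate_single] at hF ⊢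
      obtain ⟨b, st, hres⟩ := pvScan_last s (hrb c List.mem_cons_self) (k : Int) st0 P R
      exact ⟨b, st, by simpa [pvPats, pvRegs] using hres⟩
    | cons c2 t =>
      rw [pvIntercalate_cons] at hF ⊢
      have hrbc := hrb c List.mem_cons_self
      rw [show c ++ ']' :: [']'].intercalate (c2 :: t)
          = (c ++ [']']) ++ [']'].intercalate (c2 :: t) from by simp]
      rw [PySem.List.enumerate_append, List.foldl_append]
      have hcast : (k : Int) + ((c ++ [']'] : List Char).length : Int)
          = ((k + c.length + 1 : Nat) : Int) := by push_cast; simp; ring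
      by_cases hlb : '[' ∈ c
      · rw [pvScan_chunk s hlb hrbc k st0 P R
          (by rw [hF]) hk]
        obtain ⟨b, st, hres⟩ := ih (by simp)
          (fun x hx => hrb x (List.mem_cons_of_mem _ hx)) (k + c.length + 1)
          (some (((k + (c.takeWhile (· ≠ '[')).length : Nat) : Int)))
          (P ++ [String.ofList (c.dropWhile (· ≠ '[') ++ [']'])])
          (R ++ [String.ofList (pvStrip (c.dropWhile (· ≠ '[')) ++ [']'])])
          (pre ++ (c ++ [']']))
          (by rw [hF]; simp) (by simp [hk]; omega)
        rw [hcast, hres]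
        refine ⟨b, st, ?_⟩
        rw [pvPats_cons, if_pos hlb]
        simp
      · have hnolb : ∀ ch ∈ c ++ [']'], ch ≠ '[' := by
          intro ch hch
          rcases List.mem_append.mp hch with h | h
          · exact fun he => hlb (he ▸ h)
          · simp only [List.mem_singleton] at h
            subst h
            decide
        rw [pvS1 s _ hnolb]
        obtain ⟨b, st, hres⟩ := ih (by simp)
          (fun x hx => hrb x (List.mem_cons_of_mem _ hx)) (k + c.length + 1) st0 P R
          (pre ++ (c ++ [']']))
          (by rw [hF]; simp) (by simp [hk]; omega)
        rw [hcast, hres]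
        refine ⟨b, st, ?_⟩
        rw [pvPats_cons, if_neg hlb]
        simp

-- ===== A's phase 2: the enumerate/index fold is the plain pattern fold =====
theorem pvPhase2 (pats : List (List Char)) :
    ∀ (l front : List (List Char)) (n : Nat) (r : String),
      pats = front ++ l → front.length = n →
      (PySem.List.enumerate (l.map (fun u => String.ofList (u ++ [']']))) (n : Int)).foldl
        (fun result p => PySem.Str.replace result p.2
          (PySem.List.pyGetD (pats.map (fun u => String.ofList (pvStrip u ++ [']']))) p.1 ""))
        r
      = l.foldl (fun result u => PySem.Str.replace result (String.ofList (u ++ [']']))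
          (String.ofList (pvStrip u ++ [']']))) r := by
  intro l
  induction l with
  | nil => intros; simp
  | cons u l' ih =>
    intro front n r hf hn
    rw [List.map_cons, PySem.List.enumerate_cons, List.foldl_cons, List.foldl_cons]
    have hget : PySem.List.pyGetD
        (pats.map (fun u => String.ofList (pvStrip u ++ [']']))) ((n : Int)) ""
        = String.ofList (pvStrip u ++ [']']) := by
      rw [PySem.List.pyGetD_natCast]
      rw [hf, List.map_append, List.map_cons]
      rw [List.getD_eq_getElem?_getD]
      rw [List.getElem?_append_right (by simp [hn])]
      simp [hn]
    rw [hget]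
    have hcast : (n : Int) + 1 = ((n + 1 : Nat) : Int) := by push_cast; ring
    rw [hcast]
    exact ih (front ++ [u]) (n + 1) _ (by rw [hf]; simp) (by simp [hn])

-- ===== chunk combinatorics shared by both sides =====
theorem pvSplit_rb_free : ∀ (l : List Char), ∀ c ∈ l.splitOn ']', ']' ∉ c := by
  intro l
  induction l with
  | nil =>
    intro c hc
    simp only [List.splitOn, List.splitOnP_nil, List.mem_singleton] at hc
    simp [hc]
  | cons a t ih =>
    intro c hc
    by_cases ha : a = ']'
    · subst ha
      rw [show (']' :: t).splitOn ']' = [] :: t.splitOn ']' from by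
        simp [List.splitOn, List.splitOnP_cons]] at hc
      rcases List.mem_cons.mp hc with h | h
      · simp [h]
      · exact ih c h
    · rw [show ((a :: t).splitOn ']') = (t.splitOn ']').modifyHead (List.cons a) from by
        simp [List.splitOn, List.splitOnP_cons, ha]] at hc
      obtain ⟨h0, r, hr⟩ : ∃ h0 r, t.splitOn ']' = h0 :: r := by
        cases hsp : t.splitOn ']' with
        | nil => exact absurd hsp (List.splitOnP_ne_nil _ t)
        | cons x xs => exact ⟨x, xs, rfl⟩
      rw [hr, List.modifyHead_cons] at hc
      rcases List.mem_cons.mp hc with h | h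
      · subst h
        intro hm
        rcases List.mem_cons.mp hm with h | h
        · exact ha h.symm
        · exact ih h0 (by rw [hr]; exact List.mem_cons_self) h
      · exact ih c (by rw [hr]; exact List.mem_cons_of_mem _ h)

-- ===== B's segment collection is the same pattern list =====
-- str.find on a one-character pattern
theorem pvFindGoC (ch : Char) : ∀ (l : List Char) (k : Nat), ch ∈ l →
    PySem.Chars.find.go [ch] l k = ((k + (l.takeWhile (· ≠ ch)).length : Nat) : Int) := by
  intro l
  induction l with
  | nil => intro k h; simp at h
  | cons c t ih =>
    intro k h
    rw [PySem.Chars.find.go]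
    by_cases hc : c = ch
    · subst hc
      rw [if_pos (by simp [List.isPrefixOf])]
      simp
    · rw [if_neg (by simp [List.isPrefixOf]; intro hh; exact absurd hh.symm hc)]
      have hmem : ch ∈ t := by
        rcases List.mem_cons.mp h with h1 | h1
        · exact absurd h1.symm hc
        · exact h1
      rw [ih (k + 1) hmem]
      rw [List.takeWhile_cons, if_pos (by simpa using hc)]
      push_cast
      simp
      ring

theorem pvSplitGo (fuel : Nat) : ∀ (l cur : List Char) (acc : List (List Char)),
    l.length ≤ fuel →
    PySem.Chars.splitOn.go [']'] fuel l cur acc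
      = acc.reverse ++ (l.splitOn ']').modifyHead (cur.reverse ++ ·) := by
  induction fuel with
  | zero =>
    intro l cur acc h
    have : l = [] := List.eq_nil_of_length_eq_zero (Nat.le_zero.mp h)
    subst this
    simp [PySem.Chars.splitOn.go, List.splitOn, List.splitOnP_nil]
  | succ fuel ih =>
    intro l cur acc h
    match l with
    | [] => simp [PySem.Chars.splitOn.go, List.splitOn, List.splitOnP_nil]
    | c :: t =>
      rw [PySem.Chars.splitOn.go]
      by_cases hc : c = ']'
      · subst hc
        rw [if_pos (by simp [List.isPrefixOf])]
        rw [show List.drop [']'].length (']' :: t) = t from rfl]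
        rw [ih t [] _ (by simp at h; omega)]
        rw [show (']' :: t).splitOn ']' = [] :: t.splitOn ']' from by
          simp [List.splitOn, List.splitOnP_cons]]
        cases hsp : t.splitOn ']' with
        | nil => exact absurd hsp (List.splitOnP_ne_nil _ t)
        | cons x xs => simp
      · rw [if_neg (by simp [List.isPrefixOf]; intro hh; exact absurd hh.symm hc)]
        rw [ih t (c :: cur) acc (by simp at h; omega)]
        rw [show (c :: t).splitOn ']' = (t.splitOn ']').modifyHead (List.cons c) from by
          simp [List.splitOn, List.splitOnP_cons, hc]]
        rw [List.modifyHead_modifyHead]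
        cases hsp : t.splitOn ']' with
        | nil => exact absurd hsp (List.splitOnP_ne_nil _ t)
        | cons x xs => simp

theorem pvSplitOn_eq (l : List Char) : PySem.Chars.splitOn l [']'] = l.splitOn ']' := by
  rw [PySem.Chars.splitOn, pvSplitGo (l.length + 1) l [] [] (by omega)]
  cases hsp : l.splitOn ']' with
  | nil => exact absurd hsp (List.splitOnP_ne_nil _ l)
  | cons x xs => simp

theorem pvDropTake (l : List Char) (p : Char → Bool) :
    l.drop (l.takeWhile p).length = l.dropWhile p := by
  induction l with
  | nil => rfl
  | cons c t ih =>
    by_cases hc : p c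
    · rw [List.takeWhile_cons, if_pos hc, List.dropWhile_cons_of_pos hc, List.length_cons,
        List.drop_succ_cons]
      exact ih
    · rw [List.takeWhile_cons, if_neg hc, List.dropWhile_cons_of_neg hc]
      rfl

theorem pvFind_slice (p : String) (h : '[' ∈ p.toList) :
    (PySem.Str.slice p (some (PySem.Str.find p "[")) none).toList
      = p.toList.dropWhile (· ≠ '[') := by
  rw [PySem.Str.toList_slice, PySem.Chars.slice_eq_listSlice]
  rw [show PySem.Str.find p "[" = (((p.toList.takeWhile (· ≠ '[')).length : Nat) : Int) from by
    rw [PySem.Str.find, show ("[" : String).toList = ['['] from rfl, PySem.Chars.find]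
    simpa using pvFindGoC '[' p.toList 0 h]
  rw [PySem.List.slice_from_natCast]
  exact pvDropTake p.toList _

theorem pvIsIn_mem (p : String) : PySem.Str.isIn "[" p = true ↔ '[' ∈ p.toList := by
  rw [PySem.Str.isIn_iff_infix]
  rw [show ("[" : String).toList = ['['] from rfl]
  exact List.singleton_infix_iff '[' p.toList

-- segment collection on strings agrees with pvRegs on characters
theorem pvSegs (l : List (List Char)) :
    (l.map String.ofList).filterMap (fun c =>
        if PySem.Str.isIn "[" c then
          some (String.ofList ((PySem.Str.slice c (some (PySem.Str.find c "[")) none).toList ++ [']']))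
        else none)
      = (pvRegs l).map (fun u => String.ofList (u ++ [']'])) := by
  induction l with
  | nil => rfl
  | cons c t ih =>
    rw [List.map_cons, List.filterMap_cons]
    unfold pvRegs
    rw [List.filterMap_cons]
    by_cases h : '[' ∈ c
    · rw [if_pos (by rw [pvIsIn_mem, String.toList_ofList]; exact h), if_pos h]
      rw [List.map_cons]
      rw [show (PySem.Str.slice (String.ofList c) (some (PySem.Str.find (String.ofList c) "[")) none).toList
          = c.dropWhile (· ≠ '[') from by
        rw [pvFind_slice (String.ofList c) (by rw [String.toList_ofList]; exact h)]
        rw [String.toList_ofList]]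
      rw [ih]
      rfl
    · rw [if_neg (by rw [pvIsIn_mem, String.toList_ofList]; exact h), if_neg h]
      exact ih

-- replacing the newlines of one collected segment
theorem pvStripSeg (u : List Char) :
    PySem.Str.replace (String.ofList (u ++ [']'])) "\n" " "
      = String.ofList (pvStrip u ++ [']']) := by
  apply String.toList_inj.mp
  rw [PySem.Str.toList_replace, String.toList_ofList, String.toList_ofList]
  rw [show (" " : String).toList = [' '] from rfl]
  rw [pvReplace_eq _ _ _ (by simp), pvRepl_nl, pvStrip_append, String.toList_ofList]
  rfl

-- ===== VERDICT proof =====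
theorem remove_newlines_inside_square_brackets_spec :
    Claim_equal_remove_newlines_inside_square_brackets := by
  intro s _
  show remove_newlines_inside_square_brackets s = remove_newlines_inside_square_brackets_alt s
  have hne : s.toList.splitOn ']' ≠ [] := List.splitOnP_ne_nil _ _
  have hic : [']'].intercalate (s.toList.splitOn ']') = s.toList :=
    List.intercalate_splitOn s.toList ']'
  have hrb : ∀ c ∈ s.toList.splitOn ']', ']' ∉ c := pvSplit_rb_free s.toList
  -- A: the scanner collects exactly the pvPats segments, then folds the global replaces
  have hA : remove_newlines_inside_square_brackets s
      = (pvPats (s.toList.splitOn ']')).foldl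
          (fun result u => PySem.Str.replace result (String.ofList (u ++ [']']))
            (String.ofList (pvStrip u ++ [']']))) s := by
    obtain ⟨b, st, hscan⟩ := pvScan_main s (s.toList.splitOn ']') hne hrb 0 none [] [] []
      (by rw [hic]; simp) rfl
    have hconv : (PySem.List.enumerate s.toList 0).foldl (pvScanStep s) (false, none, [], [])
        = (b, st,
           (pvPats (s.toList.splitOn ']')).map (fun u => String.ofList (u ++ [']'])),
           (pvPats (s.toList.splitOn ']')).map (fun u => String.ofList (pvStrip u ++ [']']))) := by
      have he : PySem.List.enumerate s.toList 0
          = PySem.List.enumerate ([']'].intercalate (s.toList.splitOn ']')) (((0 : Nat) : Int)) := by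
        rw [hic]
        rfl
      rw [he, hscan]
      simp
    unfold remove_newlines_inside_square_brackets
    rw [hconv]
    rw [show (0 : Int) = ((0 : Nat) : Int) from rfl]
    rw [pvPhase2 (pvPats (s.toList.splitOn ']')) (pvPats (s.toList.splitOn ']')) [] 0 s rfl rfl]
  -- B: split/filterMap collects the same segments, then folds the same replaces
  have hB : remove_newlines_inside_square_brackets_alt s
      = ((pvPats (s.toList.splitOn ']')).map (fun u => String.ofList (u ++ [']']))).foldl
          (fun result segment =>
            PySem.Str.replace result segment (PySem.Str.replace segment "\n" " ")) s := by
    unfold remove_newlines_inside_square_brackets_alt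
    dsimp only
    have hchunks : (PySem.Str.split? s "]").getD []
        = (s.toList.splitOn ']').map String.ofList := by
      rw [PySem.Str.split?, show ("]" : String).toList = [']'] from rfl, PySem.Chars.split?,
        if_neg (by simp)]
      rw [Option.map_some, Option.getD_some, pvSplitOn_eq]
    rw [hchunks]
    rw [show ((s.toList.splitOn ']').map String.ofList).dropLast
        = (s.toList.splitOn ']').dropLast.map String.ofList from List.map_dropLast.symm]
    rw [pvSegs]
    rfl
  rw [hA, hB, List.foldl_map]
  have hfun : (fun (result : String) (u : List Char) =>
      PySem.Str.replace result (String.ofList (u ++ [']']))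
        (PySem.Str.replace (String.ofList (u ++ [']'])) "\n" " "))
      = (fun result u => PySem.Str.replace result (String.ofList (u ++ [']']))
          (String.ofList (pvStrip u ++ [']']))) := by
    funext result u
    rw [pvStripSeg]
  rw [hfun]
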